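-- pv_equiv track=rewrite | github.com/tiliado/nuvola-flatpaks | doc/generate_autodoc.py | generate_auto_doc
-- ===== SOURCE A (Python) =====
-- from typing import List, Iterable
--
-- AUTO_MODULE_TEMPLATE = '''
--
-- .. automodule:: {module}
--     :members:
--     :undoc-members:
--     :show-inheritance:
-- '''
--
-- def generate_auto_doc(modules: List[str]) -> str:
--     """
--     Generate simple Sphinx autodoc directives for given modules.
--
--     Tests submodules are ignored.
--
--     :param modules: The modules to document.
--     :return: The autodoc Sphinx directives.
--     """
--     output = []
--     prev_module = None
--     for module in reversed(modules):
--         if module.endswith('.tests') or '.tests.' in module: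
--             continue
--         if prev_module and prev_module.startswith(module + '.'):
--             heading = f'\n{module} package\n'
--         else:
--             heading = f'\n{module} module\n'
--         output.append(AUTO_MODULE_TEMPLATE.format(module=module))
--         output.append(('-' if '.' in module else '=') * (len(heading) - 2))
--         output.append(heading)
--         prev_module = module
--     output.reverse()
--     return ''.join(output)
-- ===== SOURCE B (Python) =====
-- AUTO_MODULE_TEMPLATE = '''
--
-- .. automodule:: {module}
--     :members:
--     :undoc-members:
--     :show-inheritance:
-- '''
--
-- def generate_auto_doc(modules):
--     """Forward single pass over the pre-filtered module list; no reversals."""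
--     keep = [m for m in modules
--             if not (m.endswith('.tests') or '.tests.' in m)]
--     parts = []
--     for i, module in enumerate(keep):
--         nxt = keep[i + 1] if i + 1 < len(keep) else None
--         kind = ' package\n' if nxt is not None and nxt.startswith(module + '.') else ' module\n'
--         heading = '\n' + module + kind
--         parts.append(heading)
--         parts.append(('-' if '.' in module else '=') * (len(heading) - 2))
--         parts.append(AUTO_MODULE_TEMPLATE.format(module=module))
--     return ''.join(parts)
-- ===== Notes on version B (the rewrite author's own statement) =====
-- stated objective: simpler
-- what changed: B pre-filters the test modules out, then makes one forward indexed pass classifying each module by peeking at the next kept module, appending heading/underline/template in output order; A's backward pass with a trailing prev_module state and the double reversal of the parts list are gone.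
import Mathlib
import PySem

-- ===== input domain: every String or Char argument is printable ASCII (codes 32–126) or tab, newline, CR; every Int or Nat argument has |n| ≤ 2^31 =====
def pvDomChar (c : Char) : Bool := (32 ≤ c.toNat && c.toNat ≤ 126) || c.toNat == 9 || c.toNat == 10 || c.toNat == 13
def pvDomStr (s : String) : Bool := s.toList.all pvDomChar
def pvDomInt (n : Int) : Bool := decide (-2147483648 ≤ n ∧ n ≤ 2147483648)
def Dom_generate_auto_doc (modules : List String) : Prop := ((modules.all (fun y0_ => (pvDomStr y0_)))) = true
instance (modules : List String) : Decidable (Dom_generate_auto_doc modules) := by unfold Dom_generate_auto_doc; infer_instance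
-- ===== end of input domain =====

-- B replaces A's backward pass with prev-state and double reversal by a pre-filter plus one
-- forward pass peeking at the next kept module (objective: simpler); same return value everywhere.

-- shared module-level constant AUTO_MODULE_TEMPLATE, as the per-module formatted string
def pvTemplate (module : String) : String :=
  "\n\n.. automodule:: " ++ module ++ "\n    :members:\n    :undoc-members:\n    :show-inheritance:\n"

-- hand port of Python string repetition s * n: exact (Python yields '' for n ≤ 0, as does toNat)
def pvRepeat (s : String) (n : Int) : String := PySem.Str.join "" (List.replicate n.toNat s)

-- ===== PORT A =====
-- the f-string headings, with Python's truthiness test 'prev_module and prev_module.startswith(module + ".")'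
def pvHeadA (module : String) (prev : Option String) : String :=
  if (match prev with
      | none => false
      | some p => !(p == "") && PySem.Str.startswith p (module ++ ".")) then
    "\n" ++ module ++ " package\n"
  else
    "\n" ++ module ++ " module\n"

-- one iteration of A's loop body over the state (output, prev_module)
def pvStepA (st : List String × Option String) (module : String) : List String × Option String :=
  if PySem.Str.endswith module ".tests" || PySem.Str.isIn ".tests." module then st
  else
    let heading := pvHeadA module st.2
    let output := st.1 ++ [pvTemplate module]
    let output := output ++ [pvRepeat (if PySem.Str.isIn "." module then "-" else "=") (PySem.Str.len heading - 2)]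
    let output := output ++ [heading]
    (output, some module)

def generate_auto_doc (modules : List String) : String :=
  let r := List.foldl pvStepA ([], none) modules.reverse
  PySem.Str.join "" r.1.reverse

-- ===== PORT B =====
-- B's forward loop with lookahead keep[i+1], as structural recursion over the filtered list
def pvAltParts : List String → List String
  | [] => []
  | module :: rest =>
    let kind := match rest.head? with
      | some nxt => if PySem.Str.startswith nxt (module ++ ".") then " package\n" else " module\n"
      | none => " module\n"
    let heading := "\n" ++ module ++ kind
    heading
      :: pvRepeat (if PySem.Str.isIn "." module then "-" else "=") (PySem.Str.len heading - 2)
      :: pvTemplate module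
      :: pvAltParts rest

def generate_auto_doc_alt (modules : List String) : String :=
  PySem.Str.join ""
    (pvAltParts (modules.filter
      (fun m => !(PySem.Str.endswith m ".tests" || PySem.Str.isIn ".tests." m))))

-- ===== PRECONDITION & SPEC =====
def Spec_generate_auto_doc (modules : List String) (out : String) : Prop := out = generate_auto_doc_alt modules
instance (modules : List String) (out : String) : Decidable (Spec_generate_auto_doc modules out) := by unfold Spec_generate_auto_doc; infer_instance

-- ===== CLAIM (what is proved, stated in full; the proofs are below) =====
def Claim_equal_generate_auto_doc : Prop := ∀ (modules : List String), Dom_generate_auto_doc modules → Spec_generate_auto_doc modules (generate_auto_doc modules)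

-- ===== LEMMAS AND PROOFS =====

def pvKeep (m : String) : Bool := !(PySem.Str.endswith m ".tests" || PySem.Str.isIn ".tests." m)

-- the prev_module state A carries after the (reversed) loop has consumed ms
def pvPrevOf : List String → Option String → Option String
  | [], p => p
  | m :: ms, p => if pvKeep m then some m else pvPrevOf ms p

def pvUnd (module : String) (prev : Option String) : String :=
  pvRepeat (if PySem.Str.isIn "." module then "-" else "=") (PySem.Str.len (pvHeadA module prev) - 2)

-- A's output list (in its stored, reversed order) after consuming ms
def pvPartsRev : List String → Option String → List String
  | [], _ => []
  | m :: ms, p =>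
    if pvKeep m then
      pvPartsRev ms p ++ [pvTemplate m, pvUnd m (pvPrevOf ms p), pvHeadA m (pvPrevOf ms p)]
    else pvPartsRev ms p

-- the same parts in forward (output) order
def pvPartsFwd : List String → Option String → List String
  | [], _ => []
  | m :: ms, p =>
    (if pvKeep m then [pvHeadA m (pvPrevOf ms p), pvUnd m (pvPrevOf ms p), pvTemplate m] else [])
      ++ pvPartsFwd ms p

theorem pvStartswith_empty (m : String) : PySem.Chars.startswith [] (m.toList ++ ['.']) = false := by
  rw [Bool.eq_false_iff, Ne, PySem.Chars.startswith_iff]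
  intro h
  have := h.length_le
  simp at this

theorem pvStepA_eq (st : List String × Option String) (m : String) :
    pvStepA st m =
      if pvKeep m = true then (st.1 ++ [pvTemplate m, pvUnd m st.2, pvHeadA m st.2], some m)
      else st := by
  unfold pvStepA pvKeep pvUnd
  cases h : (PySem.Str.endswith m ".tests" || PySem.Str.isIn ".tests." m) <;> simp

theorem pvFoldA (ms : List String) (acc : List String) (p : Option String) :
    List.foldl pvStepA (acc, p) ms.reverse = (acc ++ pvPartsRev ms p, pvPrevOf ms p) := by
  induction ms generalizing acc with
  | nil => simp [pvPartsRev, pvPrevOf]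
  | cons m ms ih =>
    rw [List.reverse_cons, List.foldl_append, ih, List.foldl_cons, List.foldl_nil, pvStepA_eq]
    by_cases h : pvKeep m = true <;> simp [pvPartsRev, pvPrevOf, h]

theorem pvRevParts (ms : List String) (p : Option String) :
    (pvPartsRev ms p).reverse = pvPartsFwd ms p := by
  induction ms with
  | nil => simp [pvPartsRev, pvPartsFwd]
  | cons m ms ih =>
    by_cases h : pvKeep m = true
    · simp [pvPartsRev, pvPartsFwd, h, ih]
    · simp [pvPartsRev, pvPartsFwd, h, ih]

theorem pvPrevOf_none (ms : List String) : pvPrevOf ms none = (ms.filter pvKeep).head? := by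
  induction ms with
  | nil => simp [pvPrevOf]
  | cons m ms ih =>
    by_cases h : pvKeep m = true
    · simp [pvPrevOf, h]
    · simp [pvPrevOf, h, ih]

theorem pvHeadA_eq (m : String) (next? : Option String) :
    pvHeadA m next? =
      "\n" ++ m ++ (match next? with
        | some nxt => if PySem.Str.startswith nxt (m ++ ".") then " package\n" else " module\n"
        | none => " module\n") := by
  cases next? with
  | none => simp [pvHeadA]
  | some p =>
    by_cases hp : p = ""
    · subst hp; simp [pvHeadA, pvStartswith_empty]
    · have hne : (p == "") = false := by simpa using hp
      simp only [pvHeadA, hne, Bool.not_false, Bool.true_and]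
      split_ifs <;> rfl

theorem pvFwd_eq_alt (ms : List String) : pvPartsFwd ms none = pvAltParts (ms.filter pvKeep) := by
  induction ms with
  | nil => simp [pvPartsFwd, pvAltParts]
  | cons m ms ih =>
    by_cases h : pvKeep m = true
    · simp only [pvPartsFwd, List.filter_cons, h, if_true, pvAltParts, ih,
        pvPrevOf_none, pvUnd, List.cons_append, List.nil_append]
      rw [pvHeadA_eq m ((ms.filter pvKeep).head?)]
    · simp [pvPartsFwd, h, ih]

-- ===== VERDICT (by name: the statement is the Claim_ definition above) =====
theorem generate_auto_doc_spec : Claim_equal_generate_auto_doc := by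
  intro modules _
  show generate_auto_doc modules = generate_auto_doc_alt modules
  unfold generate_auto_doc generate_auto_doc_alt
  rw [pvFoldA]
  simp only [List.nil_append]
  rw [pvRevParts, pvFwd_eq_alt]
  rfl
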